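-- pv_equiv track=rewrite | github.com/Shiv2157k/LeetCode2024 | microsoft_revisited/greedy/MinimumNumberOfFoodBucketsToFeedHamsters.py | minimum_number_of_food_buckets
-- ===== SOURCE A (Python) =====
-- def minimum_number_of_food_buckets(hamsters: str):
--     """
--     Approach: Greedy
--     T: O(N)
--     S: O(1)
--     :param hamsters:
--     :return:
--     """
--
--     bucket_count: int = 0
--     pointer: int = 0
--     length: int = len(hamsters)
--
--     while pointer < length:
--
--         if hamsters[pointer] == 'H':
--
--             # case 1: always place bucket right side of hamster hoping the next hamster gets fed
--             if pointer + 1 < length and hamsters[pointer + 1] == '.':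
--                 pointer += 2
--                 bucket_count += 1
--             # case 2: if we have reached here that means bucket is not reachable for the next hamster
--             # so place it to its left or this hamster is located rightmost
--             elif pointer > 0 and hamsters[pointer - 1] == '.':
--                 bucket_count += 1
--             else:  # case 3: there is no space to place the bucket
--                 return -1
--         pointer += 1
--     return bucket_count
-- ===== SOURCE B (Python) =====
-- def minimum_number_of_food_buckets(hamsters: str):
--     n = len(hamsters)
--     # feasibility: every hamster must have an empty cell next to it
--     for i, c in enumerate(hamsters):
--         if c == 'H' and not (i > 0 and hamsters[i - 1] == '.') and not (i + 1 < n and hamsters[i + 1] == '.'):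
--             return -1
--     # each hamster gets a bucket, except the right hamster of every
--     # non-overlapping "H.H" pattern, which shares the middle bucket
--     return hamsters.count('H') - hamsters.count('H.H')
-- ===== Notes on version B (the rewrite author's own statement) =====
-- stated objective: alternative
-- what changed: B replaces A's stateful pointer-skipping greedy by a feasibility scan plus a closed counting formula: buckets = (number of hamsters) minus (number of non-overlapping hamster-dot-hamster patterns, via str.count), since exactly the right hamster of each such pattern shares a bucket.
import Mathlib
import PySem

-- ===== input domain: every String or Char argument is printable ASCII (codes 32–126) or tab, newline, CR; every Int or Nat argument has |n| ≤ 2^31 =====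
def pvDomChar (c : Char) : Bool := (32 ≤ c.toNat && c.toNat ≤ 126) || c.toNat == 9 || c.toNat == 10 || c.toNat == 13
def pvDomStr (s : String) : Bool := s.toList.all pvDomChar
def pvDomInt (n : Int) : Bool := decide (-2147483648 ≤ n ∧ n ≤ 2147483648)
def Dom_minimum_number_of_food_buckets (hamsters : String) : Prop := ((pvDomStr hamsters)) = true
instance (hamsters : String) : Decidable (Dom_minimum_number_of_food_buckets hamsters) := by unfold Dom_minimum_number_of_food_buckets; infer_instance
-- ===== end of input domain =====

-- B replaces A's pointer-skipping greedy by a feasibility scan plus the counting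
-- formula count('H') - count('H.H') (objective: alternative, same asymptotic cost).

-- ===== PORT A =====
-- A's while loop: pointer/bucket_count state; after a right-side placement the pointer
-- advances by 2 inside the branch and by 1 at the loop end (net +3).
def pvLoopA (cs : List Char) (pointer : Nat) (count : Int) : Int :=
  if _h : pointer < cs.length then
    if cs.getD pointer ' ' = 'H' then
      if pointer + 1 < cs.length ∧ cs.getD (pointer + 1) ' ' = '.' then
        pvLoopA cs (pointer + 3) (count + 1)
      else if 0 < pointer ∧ cs.getD (pointer - 1) ' ' = '.' then
        pvLoopA cs (pointer + 1) (count + 1)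
      else -1
    else pvLoopA cs (pointer + 1) count
  else count
termination_by cs.length - pointer

def minimum_number_of_food_buckets (hamsters : String) : Int :=
  pvLoopA hamsters.toList 0 0

-- ===== PORT B =====
-- B's `for i, c in enumerate(hamsters)` feasibility loop with its early `return -1`.
def pvBadLoop (cs : List Char) (i : Nat) : Bool :=
  if _h : i < cs.length then
    if cs.getD i ' ' = 'H' ∧ ¬ (0 < i ∧ cs.getD (i - 1) ' ' = '.')
        ∧ ¬ (i + 1 < cs.length ∧ cs.getD (i + 1) ' ' = '.') then true
    else pvBadLoop cs (i + 1)
  else false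
termination_by cs.length - i

def minimum_number_of_food_buckets_alt (hamsters : String) : Int :=
  if pvBadLoop hamsters.toList 0 then -1
  else (PySem.Str.count hamsters "H" : Int) - (PySem.Str.count hamsters "H.H" : Int)

-- ===== PRECONDITION & SPEC =====
def Spec_minimum_number_of_food_buckets (hamsters : String) (out : Int) : Prop := out = minimum_number_of_food_buckets_alt hamsters
instance (hamsters : String) (out : Int) : Decidable (Spec_minimum_number_of_food_buckets hamsters out) := by unfold Spec_minimum_number_of_food_buckets; infer_instance

-- ===== CLAIM (what is proved, stated in full; the proofs are below) =====
def Claim_equal_minimum_number_of_food_buckets : Prop := ∀ (hamsters : String), Dom_minimum_number_of_food_buckets hamsters → Spec_minimum_number_of_food_buckets hamsters (minimum_number_of_food_buckets hamsters)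

-- ===== LEMMAS AND PROOFS =====

-- Reference recursion over the suffix; pd = "the char just before this suffix is '.'";
-- none encodes the -1 ("impossible") outcome.
def pvRef (pd : Bool) : List Char → Option Int
  | [] => some 0
  | c :: rest =>
    if c = 'H' then
      if rest.headD ' ' = '.' then
        (pvRef (decide ((rest.drop 1).headD ' ' = '.')) (rest.drop 2)).map (· + 1)
      else if pd then (pvRef false rest).map (· + 1) else none
    else pvRef (decide (c = '.')) rest
termination_by l => l.length
decreasing_by all_goals (simp; try omega)

def pvOut (count : Int) : Option Int → Int
  | none => -1
  | some m => count + m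

def pvPd (cs : List Char) (p : Nat) : Bool := decide (0 < p ∧ cs.getD (p - 1) ' ' = '.')

-- non-overlapping count of "H.H", exactly str.count's left-to-right skip rule
def pvCntHH : List Char → Nat
  | [] => 0
  | c :: rest =>
    if ['H', '.', 'H'].isPrefixOf (c :: rest) then pvCntHH (rest.drop 2) + 1
    else pvCntHH rest
termination_by l => l.length
decreasing_by all_goals (simp; try omega)

theorem pvOut_map (count : Int) (o : Option Int) :
    pvOut count (o.map (· + 1)) = pvOut (count + 1) o := by
  cases o with
  | none => simp [pvOut]
  | some m => simp [pvOut]; ring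

theorem pvHeadD_drop (cs : List Char) (n : Nat) : (cs.drop n).headD ' ' = cs.getD n ' ' := by
  simp [List.head?_drop, List.getD]

theorem pvDrop_drop (cs : List Char) (n m : Nat) : (cs.drop n).drop m = cs.drop (n + m) := by
  rw [List.drop_drop]; try ring_nf

-- pvRef at a cons head, with all tests phrased via getD at absolute positions
theorem pvRef_cons (cs : List Char) (p : Nat) (pd : Bool) (hp : p < cs.length) :
    pvRef pd (cs.drop p) =
      if cs.getD p ' ' = 'H' then
        if cs.getD (p + 1) ' ' = '.' then
          (pvRef (decide (cs.getD (p + 2) ' ' = '.')) (cs.drop (p + 3))).map (· + 1)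
        else if pd then (pvRef false (cs.drop (p + 1))).map (· + 1) else none
      else pvRef (decide (cs.getD p ' ' = '.')) (cs.drop (p + 1)) := by
  rw [List.drop_eq_getElem_cons hp, pvRef]
  rw [List.getD_eq_getElem cs ' ' hp]
  rw [pvHeadD_drop, pvDrop_drop, pvDrop_drop, pvHeadD_drop]

-- A's loop computes pvOut of the reference recursion (proved in the previous shape)
theorem pvLoopA_eq (cs : List Char) :
    ∀ k p count, cs.length - p ≤ k →
      pvLoopA cs p count = pvOut count (pvRef (pvPd cs p) (cs.drop p)) := by
  intro k
  induction k with
  | zero =>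
      intro p count hk
      have hp : ¬ p < cs.length := by omega
      have hnil : cs.drop p = [] := List.drop_eq_nil_of_le (by omega)
      rw [pvLoopA, dif_neg hp, hnil, pvRef]
      simp [pvOut]
  | succ k ih =>
      intro p count hk
      by_cases hp : p < cs.length
      · rw [pvLoopA, dif_pos hp, pvRef_cons cs p _ hp]
        by_cases hH : cs.getD p ' ' = 'H'
        · rw [if_pos hH, if_pos hH]
          by_cases hr1 : cs.getD (p + 1) ' ' = '.'
          · have h1 : p + 1 < cs.length := by
              by_contra h
              rw [List.getD_eq_default _ _ (by omega)] at hr1; exact absurd hr1 (by decide)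
            rw [if_pos ⟨h1, hr1⟩, if_pos hr1, ih (p + 3) (count + 1) (by omega), pvOut_map]
            have hpd : pvPd cs (p + 3) = decide (cs.getD (p + 2) ' ' = '.') := by
              simp [pvPd]
            rw [hpd]
          · have hnr : ¬ (p + 1 < cs.length ∧ cs.getD (p + 1) ' ' = '.') := fun h => hr1 h.2
            rw [if_neg hnr, if_neg hr1]
            by_cases hl : 0 < p ∧ cs.getD (p - 1) ' ' = '.'
            · rw [if_pos hl, ih (p + 1) (count + 1) (by omega)]
              have hpd : pvPd cs p = true := by simp [pvPd]; exact hl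
              have hpd1 : pvPd cs (p + 1) = false := by
                simp only [pvPd, decide_eq_false_iff_not]
                rintro ⟨-, hc⟩
                simp only [Nat.add_sub_cancel] at hc
                rw [hH] at hc
                exact absurd hc (by decide)
              rw [hpd, hpd1, if_pos rfl, pvOut_map]
            · rw [if_neg hl]
              have hpd : pvPd cs p = false := by
                simp only [pvPd, decide_eq_false_iff_not]; exact hl
              rw [hpd]
              simp [pvOut]
        · rw [if_neg hH, if_neg hH, ih (p + 1) count (by omega)]
          have hpd1 : pvPd cs (p + 1) = decide (cs.getD p ' ' = '.') := by
            simp [pvPd]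
          rw [hpd1]
      · have hnil : cs.drop p = [] := List.drop_eq_nil_of_le (by omega)
        rw [pvLoopA, dif_neg hp, hnil, pvRef]
        simp [pvOut]

-- B's feasibility loop returns true exactly when the reference recursion hits -1
theorem pvBadLoop_eq (cs : List Char) :
    ∀ k p, cs.length - p ≤ k →
      pvBadLoop cs p = decide (pvRef (pvPd cs p) (cs.drop p) = none) := by
  intro k
  induction k with
  | zero =>
      intro p hk
      have hp : ¬ p < cs.length := by omega
      have hnil : cs.drop p = [] := List.drop_eq_nil_of_le (by omega)
      rw [pvBadLoop, dif_neg hp, hnil, pvRef]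
      simp
  | succ k ih =>
      intro p hk
      by_cases hp : p < cs.length
      · rw [pvBadLoop, dif_pos hp, pvRef_cons cs p _ hp]
        by_cases hH : cs.getD p ' ' = 'H'
        · rw [if_pos hH]
          by_cases hr1 : cs.getD (p + 1) ' ' = '.'
          · have h1 : p + 1 < cs.length := by
              by_contra h
              rw [List.getD_eq_default _ _ (by omega)] at hr1; exact absurd hr1 (by decide)
            have hbadp : ¬ (cs.getD p ' ' = 'H' ∧ ¬ (0 < p ∧ cs.getD (p - 1) ' ' = '.')
                ∧ ¬ (p + 1 < cs.length ∧ cs.getD (p + 1) ' ' = '.')) := by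
              rintro ⟨-, -, h⟩; exact h ⟨h1, hr1⟩
            rw [if_neg hbadp, if_pos hr1]
            -- walk B's loop through p+1 (a '.') and p+2 (not an unfed hamster)
            have hstep : pvBadLoop cs (p + 1) = pvBadLoop cs (p + 3) := by
              by_cases h2 : p + 1 < cs.length
              · rw [pvBadLoop, dif_pos h2]
                have hb1 : ¬ (cs.getD (p + 1) ' ' = 'H' ∧ ¬ (0 < p + 1 ∧ cs.getD (p + 1 - 1) ' ' = '.')
                    ∧ ¬ (p + 1 + 1 < cs.length ∧ cs.getD (p + 1 + 1) ' ' = '.')) := by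
                  rintro ⟨hc, -, -⟩; rw [hr1] at hc; exact absurd hc (by decide)
                rw [if_neg hb1]
                by_cases h3 : p + 2 < cs.length
                · rw [pvBadLoop, dif_pos (by omega : p + 1 + 1 < cs.length)]
                  have hb2 : ¬ (cs.getD (p + 1 + 1) ' ' = 'H' ∧ ¬ (0 < p + 1 + 1 ∧ cs.getD (p + 1 + 1 - 1) ' ' = '.')
                      ∧ ¬ (p + 1 + 1 + 1 < cs.length ∧ cs.getD (p + 1 + 1 + 1) ' ' = '.')) := by
                    rintro ⟨-, hnl, -⟩
                    exact hnl ⟨by omega, by simpa using hr1⟩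
                  rw [if_neg hb2]
                · rw [pvBadLoop, dif_neg (by omega : ¬ p + 1 + 1 < cs.length),
                      pvBadLoop, dif_neg (by omega : ¬ p + 3 < cs.length)]
              · rw [pvBadLoop, dif_neg h2, pvBadLoop, dif_neg (by omega : ¬ p + 3 < cs.length)]
            rw [hstep, ih (p + 3) (by omega)]
            have hpd : pvPd cs (p + 3) = decide (cs.getD (p + 2) ' ' = '.') := by
              simp [pvPd]
            rw [hpd]
            cases hres : pvRef (decide (cs.getD (p + 2) ' ' = '.')) (cs.drop (p + 3)) <;> simp
          · have hnr : ¬ (p + 1 < cs.length ∧ cs.getD (p + 1) ' ' = '.') := fun h => hr1 h.2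
            rw [if_neg hr1]
            by_cases hl : 0 < p ∧ cs.getD (p - 1) ' ' = '.'
            · have hbadp : ¬ (cs.getD p ' ' = 'H' ∧ ¬ (0 < p ∧ cs.getD (p - 1) ' ' = '.')
                  ∧ ¬ (p + 1 < cs.length ∧ cs.getD (p + 1) ' ' = '.')) := by
                rintro ⟨-, h, -⟩; exact h hl
              rw [if_neg hbadp, ih (p + 1) (by omega)]
              have hpd : pvPd cs p = true := by simp [pvPd]; exact hl
              have hpd1 : pvPd cs (p + 1) = false := by
                simp only [pvPd, decide_eq_false_iff_not]
                rintro ⟨-, hc⟩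
                simp only [Nat.add_sub_cancel] at hc
                rw [hH] at hc
                exact absurd hc (by decide)
              rw [hpd, if_pos rfl, hpd1]
              cases hres : pvRef false (cs.drop (p + 1)) <;> simp
            · have hbadp : cs.getD p ' ' = 'H' ∧ ¬ (0 < p ∧ cs.getD (p - 1) ' ' = '.')
                  ∧ ¬ (p + 1 < cs.length ∧ cs.getD (p + 1) ' ' = '.') := ⟨hH, hl, hnr⟩
              rw [if_pos hbadp]
              have hpd : pvPd cs p = false := by
                simp only [pvPd, decide_eq_false_iff_not]; exact hl
              rw [hpd]
              simp
        · have hbadp : ¬ (cs.getD p ' ' = 'H' ∧ ¬ (0 < p ∧ cs.getD (p - 1) ' ' = '.')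
              ∧ ¬ (p + 1 < cs.length ∧ cs.getD (p + 1) ' ' = '.')) := by
            rintro ⟨hc, -, -⟩; exact hH hc
          rw [if_neg hbadp, if_neg hH, ih (p + 1) (by omega)]
          have hpd1 : pvPd cs (p + 1) = decide (cs.getD p ' ' = '.') := by
            simp [pvPd]
          rw [hpd1]
      · have hnil : cs.drop p = [] := List.drop_eq_nil_of_le (by omega)
        rw [pvBadLoop, dif_neg hp, hnil, pvRef]
        simp

-- when the reference recursion returns a count, it is count('H') - count('H.H')
theorem pvRef_some_aux :
    ∀ k (l : List Char), l.length ≤ k →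
      ∀ pd m, pvRef pd l = some m → m + (pvCntHH l : Int) = (l.count 'H' : Int) := by
  intro k
  induction k with
  | zero =>
      intro l hl pd m hm
      match l, hl with
      | [], _ =>
        rw [pvRef] at hm
        simp at hm
        simp [pvCntHH, ← hm]
  | succ k ih =>
    intro l hl pd m hm
    match l with
    | [] =>
        rw [pvRef] at hm
        simp at hm
        simp [pvCntHH, ← hm]
    | c :: rest =>
        rw [pvRef] at hm
        by_cases hH : c = 'H'
        · rw [if_pos hH] at hm
          subst hH
          by_cases hd : rest.headD ' ' = '.'
          · rw [if_pos hd] at hm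
            match rest with
            | [] => exact absurd hd (by decide)
            | r0 :: rest₂ =>
              simp only [List.headD_cons] at hd
              subst hd
              simp only [List.drop_succ_cons, List.drop_zero] at hm
              rw [Option.map_eq_some_iff] at hm
              obtain ⟨m', hm', rfl⟩ := hm
              match rest₂ with
              | [] =>
                  simp only [List.drop_nil, List.headD_nil] at hm'
                  rw [pvRef] at hm'
                  simp at hm'
                  subst hm'
                  have hc : pvCntHH ['H', '.'] = 0 := by
                    rw [pvCntHH, if_neg (by decide), pvCntHH, if_neg (by decide), pvCntHH]
                  rw [hc]
                  simp
              | d :: rest₃ =>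
                  simp only [List.drop_succ_cons, List.drop_zero, List.headD_cons] at hm'
                  have hrec := ih rest₃ (by simp at hl; omega) _ _ hm'
                  by_cases hdH : d = 'H'
                  · subst hdH
                    have hc : pvCntHH ('H' :: '.' :: 'H' :: rest₃) = pvCntHH rest₃ + 1 := by
                      rw [pvCntHH, if_pos (by simp [List.isPrefixOf])]
                      simp
                    rw [hc]
                    simp
                    push_cast at hrec
                    omega
                  · have hc : pvCntHH ('H' :: '.' :: d :: rest₃) = pvCntHH rest₃ := by
                      rw [pvCntHH, if_neg (by simp [List.isPrefixOf]; intro h; exact absurd h.symm hdH),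
                          pvCntHH, if_neg (by simp [List.isPrefixOf]),
                          pvCntHH, if_neg (by simp [List.isPrefixOf]; intro h; exact absurd h.symm hdH)]
                    rw [hc]
                    simp [hdH]
                    push_cast at hrec
                    omega
          · rw [if_neg hd] at hm
            cases pd with
            | false => simp at hm
            | true =>
                rw [if_pos rfl, Option.map_eq_some_iff] at hm
                obtain ⟨m', hm', rfl⟩ := hm
                have hrec := ih rest (by simp at hl; omega) _ _ hm'
                have hc : pvCntHH ('H' :: rest) = pvCntHH rest := by
                  rw [pvCntHH, if_neg ?_]
                  cases rest with
                  | nil => decide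
                  | cons r0 t =>
                      intro hpre
                      simp only [List.headD_cons] at hd
                      simp [List.isPrefixOf] at hpre
                      exact hd hpre.1.symm
                rw [hc]
                simp
                push_cast at hrec
                omega
        · rw [if_neg hH] at hm
          have hrec := ih rest (by simp at hl; omega) _ _ hm
          have hc : pvCntHH (c :: rest) = pvCntHH rest := by
            rw [pvCntHH, if_neg (by simp [List.isPrefixOf]; intro h; exact absurd h.symm hH)]
          rw [hc]
          simp [hH]
          push_cast at hrec
          omega

-- str.count bridges: single char, and the "H.H" pattern
theorem pvGo_single (l : List Char) :
    ∀ fuel acc, l.length ≤ fuel → PySem.Chars.count.go ['H'] fuel l acc = acc + l.count 'H' := by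
  induction l with
  | nil => intro fuel acc h; cases fuel <;> simp [PySem.Chars.count.go]
  | cons c t ih =>
      intro fuel acc h
      match fuel with
      | fuel + 1 =>
        rw [PySem.Chars.count.go]
        by_cases hc : c = 'H'
        · subst hc
          rw [if_pos (by simp [List.isPrefixOf])]
          simp only [List.length_cons, List.drop_succ_cons, List.length_nil, List.drop_zero]
          rw [ih fuel (acc + 1) (by simp at h; omega)]
          simp
          omega
        · rw [if_neg (by simp [List.isPrefixOf]; exact fun h => absurd h.symm hc)]
          rw [ih fuel acc (by simp at h; omega)]
          simp [hc]
  
theorem pvGo_HH :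
    ∀ k (l : List Char), l.length ≤ k →
      ∀ fuel acc, l.length ≤ fuel → PySem.Chars.count.go ['H', '.', 'H'] fuel l acc = acc + pvCntHH l := by
  intro k
  induction k with
  | zero =>
      intro l hl fuel acc h
      match l, hl with
      | [], _ => cases fuel <;> simp [PySem.Chars.count.go, pvCntHH]
  | succ k ih =>
    intro l hl fuel acc h
    match l with
    | [] => cases fuel <;> simp [PySem.Chars.count.go, pvCntHH]
    | c :: t =>
      match fuel with
      | fuel + 1 =>
        rw [PySem.Chars.count.go, pvCntHH]
        by_cases hpre : List.isPrefixOf ['H', '.', 'H'] (c :: t) = true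
        · rw [if_pos hpre, if_pos hpre]
          simp only [List.length_cons, List.drop_succ_cons]
          simp only [List.length_nil, Nat.zero_add]
          rw [ih (t.drop 2) (by simp at hl ⊢; omega) fuel (acc + 1) (by simp at h ⊢; omega)]
          omega
        · rw [if_neg hpre, if_neg hpre]
          exact ih t (by simp at hl; omega) fuel acc (by simp at h; omega)

theorem pvCount_H (s : String) : PySem.Str.count s "H" = s.toList.count 'H' := by
  rw [PySem.Str.count]
  show PySem.Chars.count s.toList ['H'] = _
  rw [PySem.Chars.count, if_neg (by simp)]
  rw [pvGo_single s.toList s.toList.length 0 le_rfl]; omega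

theorem pvCount_HH (s : String) : PySem.Str.count s "H.H" = pvCntHH s.toList := by
  rw [PySem.Str.count]
  show PySem.Chars.count s.toList ['H', '.', 'H'] = _
  rw [PySem.Chars.count, if_neg (by simp)]
  rw [pvGo_HH s.toList.length s.toList le_rfl s.toList.length 0 le_rfl]; omega

-- ===== VERDICT (by name: the statement is the Claim_ definition above) =====
theorem minimum_number_of_food_buckets_spec : Claim_equal_minimum_number_of_food_buckets := by
  intro hamsters _
  unfold Spec_minimum_number_of_food_buckets
  unfold minimum_number_of_food_buckets minimum_number_of_food_buckets_alt
  rw [pvLoopA_eq hamsters.toList hamsters.toList.length 0 0 (by omega),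
      pvBadLoop_eq hamsters.toList hamsters.toList.length 0 (by omega)]
  cases hres : pvRef (pvPd hamsters.toList 0) (hamsters.toList.drop 0) with
  | none => simp [pvOut]
  | some m =>
      have := pvRef_some_aux (hamsters.toList.drop 0).length _ le_rfl _ m hres
      simp only [List.drop_zero] at hres this
      simp only [pvOut, decide_eq_true_eq]
      rw [if_neg (by simp), pvCount_H, pvCount_HH]
      omega
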